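-- pv_equiv track=rewrite | github.com/hotteok00/Algorithm | 프로그래머스/2/147354. 테이블 해시 함수/테이블 해시 함수.py | solution
-- ===== SOURCE A (Python) =====
-- def solution(data, col, row_begin, row_end):
--     answer = []
--
--     data.sort(key=lambda x: (x[col-1], -x[0]))
--
--     for i in range(len(data)):
--         if row_begin <= i+1 <= row_end:
--             answer.append(sum([c % (i+1) for c in data[i]]))
--
--     for i in range(1, len(answer)):
--         answer[0] ^= answer[i]
--
--     return answer[0]
-- ===== SOURCE B (Python) =====
-- def xor_all(hs):
--     # divide-and-conquer XOR reduction (log-depth recursion)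
--     if len(hs) == 1:
--         return hs[0]
--     m = len(hs) // 2
--     return xor_all(hs[:m]) ^ xor_all(hs[m:])
--
--
-- def solution(data, col, row_begin, row_end):
--     data.sort(key=lambda x: (x[col-1], -x[0]))
--     lo = max(row_begin, 1)
--     window = data[lo - 1:min(row_end, len(data))]
--     hashes = [sum(c % i for c in row) for i, row in enumerate(window, start=lo)]
--     return xor_all(hashes)
-- ===== Notes on version B (the rewrite author's own statement) =====
-- stated objective: alternative
-- what changed: After the identical in-place sort, A scans every index of the table filtering the window into a list and then XORs that list left-to-right into its head; B instead slices the window out directly, builds the row hashes by enumerate over the slice (1-based), and reduces them with a recursive divide-and-conquer XOR (log-depth), correct because XOR is associative and commutative.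
import Mathlib
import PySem

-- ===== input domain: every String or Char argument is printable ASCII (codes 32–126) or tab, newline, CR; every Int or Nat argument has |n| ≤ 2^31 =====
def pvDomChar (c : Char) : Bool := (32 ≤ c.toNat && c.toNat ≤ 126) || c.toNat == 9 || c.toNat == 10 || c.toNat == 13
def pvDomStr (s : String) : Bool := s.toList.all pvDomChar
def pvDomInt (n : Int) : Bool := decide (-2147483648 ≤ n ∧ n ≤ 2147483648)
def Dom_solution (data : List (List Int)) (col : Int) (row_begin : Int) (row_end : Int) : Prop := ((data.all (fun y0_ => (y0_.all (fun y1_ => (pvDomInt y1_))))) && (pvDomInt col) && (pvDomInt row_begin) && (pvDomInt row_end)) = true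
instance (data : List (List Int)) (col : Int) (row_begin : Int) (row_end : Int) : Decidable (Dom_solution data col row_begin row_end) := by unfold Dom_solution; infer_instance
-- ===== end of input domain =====

-- B replaces A's post-sort passes (full-table scan filtering the window into a list, then a
-- left-to-right XOR loop into its head) by slicing the window out, hashing it via enumerate,
-- and a recursive divide-and-conquer XOR reduction; same return value on Pre_. Both programs
-- sort `data` in place; the equivalence proved here is about the RETURN value (B performs the
-- same mutation).

-- ===== PORT A =====
def solution (data : List (List Int)) (col : Int) (row_begin : Int) (row_end : Int) : Int :=
  let sd := PySem.List.sorted2 data (fun x => PySem.List.pyGetD x (col - 1) 0)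
              (fun x => -(PySem.List.pyGetD x 0 0))
  let answer : List Int :=
    (PySem.List.pyRange 0 (PySem.List.len sd)).foldl
      (fun acc i =>
        if row_begin ≤ i + 1 ∧ i + 1 ≤ row_end then
          acc ++ [((PySem.List.pyGetD sd i []).map (fun c => PySem.Int.mod c (i + 1))).sum]
        else acc) []
  (PySem.List.pyRange 1 (PySem.List.len answer)).foldl
    (fun a0 i => PySem.Int.bxor a0 (PySem.List.pyGetD answer i 0))
    (PySem.List.pyGetD answer 0 0)

-- ===== PORT B =====
-- xor_all: divide-and-conquer XOR reduction; hs[:m] / hs[m:] with 0 ≤ m ≤ len(hs) are exactly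
-- take/drop; the `length ≤ 1` guard only makes the recursion total (Python diverges on []).
def pvXorAll (hs : List Int) : Int :=
  if _h : hs.length ≤ 1 then PySem.List.pyGetD hs 0 0
  else
    PySem.Int.bxor (pvXorAll (hs.take (hs.length / 2))) (pvXorAll (hs.drop (hs.length / 2)))
termination_by hs.length
decreasing_by
  all_goals simp only [List.length_take, List.length_drop]
  all_goals omega

def solution_alt (data : List (List Int)) (col : Int) (row_begin : Int) (row_end : Int) : Int :=
  let sd := PySem.List.sorted2 data (fun x => PySem.List.pyGetD x (col - 1) 0)
              (fun x => -(PySem.List.pyGetD x 0 0))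
  let lo := max row_begin 1
  let window := PySem.List.slice sd (some (lo - 1)) (some (min row_end (PySem.List.len sd)))
  let hashes := (PySem.List.enumerate window lo).map
      (fun p => (p.2.map (fun c => PySem.Int.mod c p.1)).sum)
  pvXorAll hashes

-- ===== PRECONDITION & SPEC =====
-- Pre_ excludes exactly the inputs on which the Python A raises: a row that is empty or too
-- short for column index col-1 (IndexError inside the sort key) and an empty selected window
-- max(row_begin,1) > min(row_end, len(data)) (IndexError on answer[0]).
def Pre_solution (data : List (List Int)) (col : Int) (row_begin : Int) (row_end : Int) : Prop :=
  (∀ r ∈ data, r ≠ [] ∧ PySem.Raise.InRange r.length (col - 1)) ∧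
  max row_begin 1 ≤ min row_end (data.length : Int)
instance (data : List (List Int)) (col : Int) (row_begin : Int) (row_end : Int) : Decidable (Pre_solution data col row_begin row_end) := by unfold Pre_solution; infer_instance

def pvWitness_solution : List (List Int) × Int × Int × Int := ([[5, 2], [1, 4], [3, 3]], 2, 1, 2)

def Spec_solution (data : List (List Int)) (col : Int) (row_begin : Int) (row_end : Int) (out : Int) : Prop := out = solution_alt data col row_begin row_end
instance (data : List (List Int)) (col : Int) (row_begin : Int) (row_end : Int) (out : Int) : Decidable (Spec_solution data col row_begin row_end out) := by unfold Spec_solution; infer_instance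

-- ===== CLAIM (what is proved, stated in full; the proofs are below) =====
def Claim_equal_solution : Prop := ∀ (data : List (List Int)) (col : Int) (row_begin : Int) (row_end : Int), Dom_solution data col row_begin row_end → Pre_solution data col row_begin row_end → Spec_solution data col row_begin row_end (solution data col row_begin row_end)

-- ===== LEMMAS AND PROOFS =====

-- every Int is ↑m or -↑m-1
theorem pv_int_rep (a : Int) : (∃ m : Nat, a = (m : Int)) ∨ (∃ m : Nat, a = -(m : Int) - 1) := by
  cases a with
  | ofNat m => exact Or.inl ⟨m, rfl⟩
  | negSucc m => exact Or.inr ⟨m, by simp [Int.negSucc_eq]; ring⟩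

theorem pv_bxor_negSucc_natCast (m n : Nat) :
    PySem.Int.bxor (-(m : Int) - 1) (n : Int) = -((m ^^^ n : Nat) : Int) - 1 := by
  simp [PySem.Int.bxor]
  omega

theorem pv_bxor_natCast_negSucc (m n : Nat) :
    PySem.Int.bxor (m : Int) (-(n : Int) - 1) = -((m ^^^ n : Nat) : Int) - 1 := by
  simp [PySem.Int.bxor]
  omega

theorem pv_bxor_negSucc_negSucc (m n : Nat) :
    PySem.Int.bxor (-(m : Int) - 1) (-(n : Int) - 1) = ((m ^^^ n : Nat) : Int) := by
  simp [PySem.Int.bxor]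
  omega

theorem pv_bxor_assoc (a b c : Int) :
    PySem.Int.bxor (PySem.Int.bxor a b) c = PySem.Int.bxor a (PySem.Int.bxor b c) := by
  rcases pv_int_rep a with ⟨x, rfl⟩ | ⟨x, rfl⟩ <;>
    rcases pv_int_rep b with ⟨y, rfl⟩ | ⟨y, rfl⟩ <;>
      rcases pv_int_rep c with ⟨z, rfl⟩ | ⟨z, rfl⟩ <;>
        simp only [PySem.Int.bxor_natCast, pv_bxor_negSucc_natCast, pv_bxor_natCast_negSucc,
          pv_bxor_negSucc_negSucc, Nat.xor_assoc]

theorem pv_foldl_bxor_shift (l : List Int) (a : Int) :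
    l.foldl PySem.Int.bxor a = PySem.Int.bxor a (l.foldl PySem.Int.bxor 0) := by
  induction l generalizing a with
  | nil => simp [PySem.Int.bxor_zero]
  | cons h t ih =>
    simp only [List.foldl_cons]
    rw [ih (PySem.Int.bxor a h), ih (PySem.Int.bxor 0 h), pv_bxor_assoc]
    rw [PySem.Int.bxor_comm 0 h, PySem.Int.bxor_zero]

theorem pv_xorAll_eq (hs : List Int) (hne : hs ≠ []) :
    pvXorAll hs = hs.foldl PySem.Int.bxor 0 := by
  induction hs using pvXorAll.induct with
  | case1 hs h =>
    match hs, hne with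
    | [a], _ =>
      simp [pvXorAll, PySem.List.pyGetD_zero_cons, PySem.Int.bxor_comm, PySem.Int.bxor_zero]
    | a :: b :: t, _ => simp at h
  | case2 hs h ih1 ih2 =>
    rw [pvXorAll, dif_neg h]
    have h2 : 2 ≤ hs.length := by omega
    have hm : 1 ≤ hs.length / 2 := by omega
    rw [ih1 (by
          intro hc
          rcases List.take_eq_nil_iff.mp hc with h0 | h0
          · omega
          · rw [h0] at h; simp at h),
        ih2 (by
          intro hc
          have := List.drop_eq_nil_iff.mp hc
          omega)]
    conv_rhs => rw [← List.take_append_drop (hs.length / 2) hs]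
    rw [List.foldl_append,
      pv_foldl_bxor_shift (hs.drop (hs.length / 2))
        ((hs.take (hs.length / 2)).foldl PySem.Int.bxor 0)]

-- indexing the tail: [ys[i] for i in range(1, len(ys))] is ys[1:]
theorem pv_map_pyGetD_tail (ys : List Int) :
    (PySem.List.pyRange 1 (PySem.List.len ys)).map (fun i => PySem.List.pyGetD ys i 0)
      = ys.drop 1 := by
  cases ys with
  | nil => simp [PySem.List.pyRange_one_eq_nil, PySem.List.len]
  | cons y t =>
    rw [PySem.List.pyRange_one, List.map_map]
    have hlen : ((PySem.List.len (y :: t)) - 1).toNat = t.length := by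
      simp [PySem.List.len_eq]
    rw [hlen, List.drop_one, List.tail_cons]
    apply List.ext_getElem
    · simp
    · intro k hk hk'
      simp only [List.getElem_map, List.getElem_range, Function.comp_apply]
      have hc : (1 : Int) + (k : Int) = ((k + 1 : Nat) : Int) := by push_cast; ring
      rw [hc, PySem.List.pyGetD_natCast]
      simp [List.getElem?_eq_getElem hk']

-- the filtered index list of A's first loop IS the clamped window range
theorem pv_filter_window (n row_begin row_end : Int) (hn : 0 ≤ n) :
    (PySem.List.pyRange 0 n).filter
        (fun i => decide (row_begin ≤ i + 1 ∧ i + 1 ≤ row_end))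
      = PySem.List.pyRange (max row_begin 1 - 1) (min row_end n) := by
  by_cases hw : max row_begin 1 - 1 ≤ min row_end n
  · have h1 : (0 : Int) ≤ max row_begin 1 - 1 := by omega
    have h2 : min row_end n ≤ n := by omega
    rw [PySem.List.pyRange_one_append 0 (max row_begin 1 - 1) n h1 (by omega),
        PySem.List.pyRange_one_append (max row_begin 1 - 1) (min row_end n) n hw h2,
        List.filter_append, List.filter_append]
    rw [List.filter_eq_nil_iff.mpr, List.filter_eq_self.mpr, List.filter_eq_nil_iff.mpr]
    · simp
    · intro i hi
      rw [PySem.List.mem_pyRange_one] at hi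
      simp only [decide_eq_true_eq]; omega
    · intro i hi
      rw [PySem.List.mem_pyRange_one] at hi
      simp only [decide_eq_true_eq]; omega
    · intro i hi
      rw [PySem.List.mem_pyRange_one] at hi
      simp only [decide_eq_true_eq]; omega
  · rw [show PySem.List.pyRange (max row_begin 1 - 1) (min row_end n) = ([] : List Int) from
        PySem.List.pyRange_one_eq_nil (by omega)]
    rw [List.filter_eq_nil_iff]
    intro i hi
    rw [PySem.List.mem_pyRange_one] at hi
    simp only [decide_eq_true_eq]; omega

-- XOR-folding the tail from the head is XOR-folding the whole list from 0
theorem pv_fold_head (l : List Int) (h : l ≠ []) :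
    (l.drop 1).foldl PySem.Int.bxor (PySem.List.pyGetD l 0 0) = l.foldl PySem.Int.bxor 0 := by
  cases l with
  | nil => exact absurd rfl h
  | cons y t =>
    simp [PySem.List.pyGetD_zero_cons, PySem.Int.bxor_comm 0 y, PySem.Int.bxor_zero]

-- B's hash list (enumerate over the slice) is A's hash list (map over the window range)
theorem pv_hashes_eq (sd : List (List Int)) (row_begin row_end : Int)
    (hw : max row_begin 1 ≤ min row_end (sd.length : Int)) :
    (PySem.List.enumerate
        (PySem.List.slice sd (some (max row_begin 1 - 1))
          (some (min row_end (PySem.List.len sd)))) (max row_begin 1)).map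
      (fun p => (p.2.map (fun c => PySem.Int.mod c p.1)).sum)
    = (PySem.List.pyRange (max row_begin 1 - 1) (min row_end (PySem.List.len sd))).map
        (fun i => ((PySem.List.pyGetD sd i []).map (fun c => PySem.Int.mod c (i + 1))).sum) := by
  set lo : Int := max row_begin 1 with hlo
  have h1 : (0 : Int) ≤ lo - 1 := by omega
  have h2 : (0 : Int) ≤ min row_end (sd.length : Int) := by omega
  rw [PySem.List.len_eq sd, PySem.List.slice_toNat sd h1 h2, PySem.List.pyRange_one]
  apply List.ext_getElem
  · simp [PySem.List.length_enumerate]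
    omega
  · intro k hk hk'
    have hkw : (lo - 1).toNat + k < sd.length := by
      simp [PySem.List.length_enumerate] at hk; omega
    simp only [List.getElem_map, PySem.List.getElem_enumerate, List.getElem_take,
      List.getElem_drop, List.getElem_range]
    have hc1 : lo - 1 + (k : Int) = (((lo - 1).toNat + k : Nat) : Int) := by omega
    rw [hc1, PySem.List.pyGetD_natCast]
    have hkw' : lo.toNat - 1 + k < sd.length := by omega
    have hg : sd.getD ((lo - 1).toNat + k) [] = sd[(lo - 1).toNat + k] := by
      simp [List.getD_eq_getElem?_getD, List.getElem?_eq_getElem hkw']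
    rw [hg, show ((((lo - 1).toNat + k : Nat) : Int) + 1) = lo + (k : Int) by omega]

-- ===== VERDICT (by name: the statement is the Claim_ definition above) =====
theorem solution_spec : Claim_equal_solution := by
  intro data col row_begin row_end _ hpre
  unfold Spec_solution solution solution_alt
  dsimp only
  set sd := PySem.List.sorted2 data (fun x => PySem.List.pyGetD x (col - 1) 0)
      (fun x => -(PySem.List.pyGetD x 0 0)) false with hsd
  have hlen : sd.length = data.length := (PySem.List.sorted2_perm data _ _ false).length_eq
  have hw : max row_begin 1 ≤ min row_end (sd.length : Int) := by
    rw [hlen]; exact hpre.2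
  set h : Int → Int := fun i =>
      ((PySem.List.pyGetD sd i []).map (fun c => PySem.Int.mod c (i + 1))).sum with hh
  -- A's first loop builds the mapped window range
  have hans : (PySem.List.pyRange 0 (PySem.List.len sd)).foldl
      (fun acc i => if row_begin ≤ i + 1 ∧ i + 1 ≤ row_end then acc ++ [h i] else acc) []
      = (PySem.List.pyRange (max row_begin 1 - 1) (min row_end (sd.length : Int))).map h := by
    rw [PySem.List.foldl_append_ite (fun i => row_begin ≤ i + 1 ∧ i + 1 ≤ row_end) h,
        List.nil_append, PySem.List.len_eq sd,
        pv_filter_window (sd.length : Int) row_begin row_end (Int.natCast_nonneg _)]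
  rw [hans]
  set ans := (PySem.List.pyRange (max row_begin 1 - 1) (min row_end (sd.length : Int))).map h
    with hansdef
  -- A's second loop is a left fold of bxor over ans
  have hne : ans ≠ [] := by
    rw [hansdef]
    have : max row_begin 1 - 1 < min row_end (sd.length : Int) := by omega
    rw [PySem.List.pyRange_one_cons this]
    simp
  have hA : (PySem.List.pyRange 1 (PySem.List.len ans)).foldl
        (fun a0 i => PySem.Int.bxor a0 (PySem.List.pyGetD ans i 0))
        (PySem.List.pyGetD ans 0 0)
      = (ans.drop 1).foldl PySem.Int.bxor (PySem.List.pyGetD ans 0 0) := by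
    rw [← pv_map_pyGetD_tail ans, List.foldl_map]
  rw [hA, pv_fold_head ans hne]
  -- B's side
  rw [pv_hashes_eq sd row_begin row_end hw, PySem.List.len_eq sd, ← hansdef,
    pv_xorAll_eq ans hne]
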